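-- pv_equiv track=rewrite | github.com/Kavee12345/CareNode | backend/app/agent/output_parser.py | extract_escalation
-- ===== SOURCE A (Python) =====
-- EMERGENCY_KEYWORDS = [
--     "chest pain", "heart attack", "stroke", "can't breathe", "cannot breathe",
--     "difficulty breathing", "shortness of breath", "unconscious", "severe bleeding",
--     "anaphylaxis", "allergic reaction severe", "call 911", "emergency room",
--     "worst headache", "sudden vision loss", "facial droop", "seek emergency care",
-- ]
--
-- URGENT_KEYWORDS = [
--     "high fever", "fever 103", "fever 104", "fever 105",
--     "blood clot", "dvt", "pulmonary embolism",
--     "severe pain", "uncontrolled", "worsening rapidly",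
--     "see a doctor soon", "see your doctor",
-- ]
--
-- MILD_KEYWORDS = [
--     "monitor", "keep an eye on", "routine check", "follow up with your doctor",
--     "schedule an appointment", "worth mentioning",
-- ]
--
-- def extract_escalation(text: str) -> str:
--     """Detect escalation level from keywords in the text."""
--     text_lower = text.lower()
--     for kw in EMERGENCY_KEYWORDS:
--         if kw in text_lower:
--             return "emergency"
--     for kw in URGENT_KEYWORDS:
--         if kw in text_lower:
--             return "urgent"
--     for kw in MILD_KEYWORDS:
--         if kw in text_lower:
--             return "mild"
--     return "none"
-- ===== SOURCE B (Python) =====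
-- EMERGENCY_KEYWORDS = [
--     "chest pain", "heart attack", "stroke", "can't breathe", "cannot breathe",
--     "difficulty breathing", "shortness of breath", "unconscious", "severe bleeding",
--     "anaphylaxis", "allergic reaction severe", "call 911", "emergency room",
--     "worst headache", "sudden vision loss", "facial droop", "seek emergency care",
-- ]
--
-- URGENT_KEYWORDS = [
--     "high fever", "fever 103", "fever 104", "fever 105",
--     "blood clot", "dvt", "pulmonary embolism",
--     "severe pain", "uncontrolled", "worsening rapidly",
--     "see a doctor soon", "see your doctor",
-- ]
--
-- MILD_KEYWORDS = [
--     "monitor", "keep an eye on", "routine check", "follow up with your doctor",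
--     "schedule an appointment", "worth mentioning",
-- ]
--
-- _LEVELS = ["emergency", "urgent", "mild"]
-- _TABLE = [
--     (kw, p)
--     for p, kws in enumerate([EMERGENCY_KEYWORDS, URGENT_KEYWORDS, MILD_KEYWORDS])
--     for kw in kws
-- ]
--
--
-- def extract_escalation(text: str) -> str:
--     """Detect escalation level from keywords in the text."""
--     text_lower = text.lower()
--     hits = [p for kw, p in _TABLE if kw in text_lower]
--     return _LEVELS[min(hits)] if hits else "none"
-- ===== Notes on version B (the rewrite author's own statement) =====
-- stated objective: alternative
-- what changed: Replaces the three per-category early-return scans by a flat precompiled (keyword, priority) table: one comprehension collects every matching priority and the level of the minimum priority is returned (min over hits instead of ordered short-circuit loops).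
import Mathlib
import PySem

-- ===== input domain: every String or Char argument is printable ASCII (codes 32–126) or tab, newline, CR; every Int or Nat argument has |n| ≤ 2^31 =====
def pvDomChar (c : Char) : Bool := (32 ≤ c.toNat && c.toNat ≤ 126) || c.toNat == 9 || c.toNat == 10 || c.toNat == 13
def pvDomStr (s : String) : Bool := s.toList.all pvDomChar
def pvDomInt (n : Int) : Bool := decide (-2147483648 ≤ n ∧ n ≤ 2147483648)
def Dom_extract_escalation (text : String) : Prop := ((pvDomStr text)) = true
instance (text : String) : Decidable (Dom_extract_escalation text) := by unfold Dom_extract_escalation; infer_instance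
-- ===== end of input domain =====

-- B replaces A's three per-category early-return keyword scans by one flat (keyword, priority)
-- table whose matching priorities are collected and minimised ('alternative', same cost).

-- module-level keyword constants (shared by both programs)
def EMERGENCY_KEYWORDS : List String := [
    "chest pain", "heart attack", "stroke", "can't breathe", "cannot breathe",
    "difficulty breathing", "shortness of breath", "unconscious", "severe bleeding",
    "anaphylaxis", "allergic reaction severe", "call 911", "emergency room",
    "worst headache", "sudden vision loss", "facial droop", "seek emergency care"]

def URGENT_KEYWORDS : List String := [
    "high fever", "fever 103", "fever 104", "fever 105",
    "blood clot", "dvt", "pulmonary embolism",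
    "severe pain", "uncontrolled", "worsening rapidly",
    "see a doctor soon", "see your doctor"]

def MILD_KEYWORDS : List String := [
    "monitor", "keep an eye on", "routine check", "follow up with your doctor",
    "schedule an appointment", "worth mentioning"]

-- ===== PORT A =====
-- 'for kw in kws: if kw in text_lower: return <level>' — the early-return loop as structural recursion
def pvScanA (tl : String) : List String → Bool
  | [] => false
  | kw :: rest => if PySem.Str.isIn kw tl then true else pvScanA tl rest

def extract_escalation (text : String) : String :=
  let text_lower := PySem.Str.lower text
  if pvScanA text_lower EMERGENCY_KEYWORDS then "emergency"
  else if pvScanA text_lower URGENT_KEYWORDS then "urgent"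
  else if pvScanA text_lower MILD_KEYWORDS then "mild"
  else "none"

-- ===== PORT B =====
def pvLevels : List String := ["emergency", "urgent", "mild"]

-- _TABLE = [(kw, p) for p, kws in enumerate([...]) for kw in kws]
def pvTable : List (String × Int) :=
  (PySem.List.enumerate [EMERGENCY_KEYWORDS, URGENT_KEYWORDS, MILD_KEYWORDS] 0).flatMap
    (fun pk => pk.2.map (fun kw => (kw, pk.1)))

def extract_escalation_alt (text : String) : String :=
  let text_lower := PySem.Str.lower text
  let hits := (pvTable.filter (fun e => PySem.Str.isIn e.1 text_lower)).map (fun e => e.2)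
  -- '_LEVELS[min(hits)] if hits else "none"' ; min(hits) ∈ {0,1,2} so indexing is in range (pyGetD exact here)
  match PySem.List.min? hits (fun x => x) with
  | some m => PySem.List.pyGetD pvLevels m ""
  | none => "none"

-- ===== PRECONDITION & SPEC =====
def Spec_extract_escalation (text : String) (out : String) : Prop := out = extract_escalation_alt text
instance (text : String) (out : String) : Decidable (Spec_extract_escalation text out) := by unfold Spec_extract_escalation; infer_instance

-- ===== CLAIM (what is proved, stated in full; the proofs are below) =====
def Claim_equal_extract_escalation : Prop := ∀ (text : String), Dom_extract_escalation text → Spec_extract_escalation text (extract_escalation text)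

-- ===== LEMMAS AND PROOFS =====

theorem pvScanA_eq_any (tl : String) (kws : List String) :
    pvScanA tl kws = kws.any (fun kw => PySem.Str.isIn kw tl) := by
  induction kws with
  | nil => rfl
  | cons kw rest ih =>
    simp only [pvScanA, List.any_cons]
    by_cases h : PySem.Str.isIn kw tl = true <;> simp [ih]


theorem pvTable_eq :
    pvTable = EMERGENCY_KEYWORDS.map (fun kw => (kw, (0 : Int)))
      ++ URGENT_KEYWORDS.map (fun kw => (kw, (1 : Int)))
      ++ MILD_KEYWORDS.map (fun kw => (kw, (2 : Int))) := by
  rfl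

theorem foldl_min_of_le {a : Int} (t : List Int) (h : ∀ y ∈ t, a ≤ y) :
    t.foldl min a = a := by
  induction t with
  | nil => rfl
  | cons y t ih =>
    simp only [List.foldl_cons]
    rw [min_eq_left (h y (by simp))]
    exact ih (fun z hz => h z (by simp [hz]))

-- hits decomposes into three constant-valued blocks
theorem hits_eq (tl : String) :
    (pvTable.filter (fun e => PySem.Str.isIn e.1 tl)).map (fun e => e.2)
      = (EMERGENCY_KEYWORDS.filter (fun kw => PySem.Str.isIn kw tl)).map (fun _ => (0 : Int))
        ++ (URGENT_KEYWORDS.filter (fun kw => PySem.Str.isIn kw tl)).map (fun _ => (1 : Int))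
        ++ (MILD_KEYWORDS.filter (fun kw => PySem.Str.isIn kw tl)).map (fun _ => (2 : Int)) := by
  rw [pvTable_eq]
  simp [List.filter_append, List.filter_map, List.map_map, Function.comp_def]

theorem min_hits_block {c : Int} (xs rest : List Int) (hxs : ∀ y ∈ xs, y = c)
    (hrest : ∀ y ∈ rest, c ≤ y) (hne : xs ≠ []) :
    PySem.List.min? (xs ++ rest) (fun x => x) = some c := by
  cases xs with
  | nil => exact absurd rfl hne
  | cons a t =>
    have ha : a = c := hxs a (by simp)
    subst ha
    rw [List.cons_append, PySem.List.min?_id_cons]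
    congr 1
    exact foldl_min_of_le _ (fun y hy => by
      rcases List.mem_append.1 hy with h | h
      · exact le_of_eq (hxs y (by simp [h])).symm
      · exact hrest y h)

-- the min-of-hits routing, over arbitrary keyword lists and an arbitrary match predicate
theorem min_route (f : String → Bool) (E U M : List String) :
    (match PySem.List.min? (((E.filter f).map fun _ => (0 : Int))
        ++ ((U.filter f).map fun _ => (1 : Int))
        ++ ((M.filter f).map fun _ => (2 : Int))) (fun x => x) with
     | some m => PySem.List.pyGetD pvLevels m ""
     | none => "none")
    = if E.any f then "emergency" else if U.any f then "urgent"
      else if M.any f then "mild" else "none" := by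
  have filt : ∀ (L : List String), L.any f = false ↔ L.filter f = [] := by
    intro L
    rw [← Bool.not_eq_true, List.any_eq_true, List.filter_eq_nil_iff]
    simp
  by_cases hE : E.any f = true
  · have hne : E.filter f ≠ [] := by
      intro h; rw [← filt] at h; simp [h] at hE
    rw [if_pos hE, List.append_assoc,
      min_hits_block (c := 0) _ _ (by simp) (by
        intro y hy
        rcases List.mem_append.1 hy with h | h <;> simp only [List.mem_map] at h <;>
          obtain ⟨_, _, rfl⟩ := h <;> omega) (by simpa using hne)]
    rfl
  · have hEnil : E.filter f = [] := (filt E).1 (by simpa using hE)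
    rw [if_neg hE, hEnil, List.map_nil, List.nil_append]
    by_cases hU : U.any f = true
    · have hne : U.filter f ≠ [] := by
        intro h; rw [← filt] at h; simp [h] at hU
      rw [if_pos hU,
        min_hits_block (c := 1) _ _ (by simp) (by
          intro y hy; simp only [List.mem_map] at hy; obtain ⟨_, _, rfl⟩ := hy; omega) (by simpa using hne)]
      rfl
    · have hUnil : U.filter f = [] := (filt U).1 (by simpa using hU)
      rw [if_neg hU, hUnil, List.map_nil, List.nil_append]
      by_cases hM : M.any f = true
      · have hne : M.filter f ≠ [] := by
          intro h; rw [← filt] at h; simp [h] at hM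
        rw [if_pos hM, ← List.append_nil ((M.filter f).map fun _ => (2 : Int)),
          min_hits_block (c := 2) _ _ (by simp) (by simp) (by simpa using hne)]
        rfl
      · have hMnil : M.filter f = [] := (filt M).1 (by simpa using hM)
        rw [if_neg hM, hMnil, List.map_nil]
        rfl

theorem alt_characterization (text : String) :
    extract_escalation_alt text =
      (if EMERGENCY_KEYWORDS.any (fun kw => PySem.Str.isIn kw (PySem.Str.lower text)) then "emergency"
       else if URGENT_KEYWORDS.any (fun kw => PySem.Str.isIn kw (PySem.Str.lower text)) then "urgent"
       else if MILD_KEYWORDS.any (fun kw => PySem.Str.isIn kw (PySem.Str.lower text)) then "mild"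
       else "none") := by
  show (match PySem.List.min?
      ((pvTable.filter (fun e => PySem.Str.isIn e.1 (PySem.Str.lower text))).map (fun e => e.2))
      (fun x => x) with
    | some m => PySem.List.pyGetD pvLevels m ""
    | none => "none") = _
  rw [hits_eq, min_route]

-- ===== VERDICT (by name: the statement is the Claim_ definition above) =====
theorem extract_escalation_spec : Claim_equal_extract_escalation := by
  intro text _
  unfold Spec_extract_escalation
  rw [alt_characterization]
  simp only [extract_escalation, pvScanA_eq_any]
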